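-- pv_equiv track=rewrite | github.com/graynk/BonDo | bot.py | construct_ffmpeg_args
-- ===== SOURCE A (Python) =====
-- from typing import Optional, AnyStr, List, Match
--
-- def construct_ffmpeg_args(oh_voice: str, sabbath_voice: str, output: str) -> List[str]:
--     filter_string = '[0:a]volume=1.0[a0]; '
--     args = ['ffmpeg',
--             '-i', 'baguette.mp4',
--             '-filter_complex',
--             '-map', '0:v',
--             '-map', '[out]',
--             '-preset', 'ultrafast',
--             output]
--
--     inputs = 1
--     if oh_voice is not None:
--         filter_string += '[{0}:a]adelay=1500|1500,volume=5.0[a{0}]; '.format(inputs)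
--         inputs += 1
--         args.insert(inputs * 2 - 1, oh_voice)
--         args.insert(inputs * 2 - 1, '-i')
--         filter_string += '[{0}:a]adelay=5500|5500,volume=5.0[a{0}]; '.format(inputs)
--         inputs += 1
--         args.insert(inputs * 2 - 1, oh_voice)
--         args.insert(inputs * 2 - 1, '-i')
--     if sabbath_voice is not None:
--         filter_string += '[{0}:a]adelay=3200|3200,volume=5.0[a{0}]; '.format(inputs)
--         inputs += 1
--         args.insert(inputs * 2 - 1, sabbath_voice)
--         args.insert(inputs * 2 - 1, '-i')
--
--     for input_number in range(inputs):
--         filter_string += '[a{}]'.format(input_number)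
--     filter_string += 'amix=inputs={}:duration=longest[out]'.format(inputs)
--     args.insert(inputs * 2 + 2, filter_string)
--     return args
-- ===== SOURCE B (Python) =====
-- def construct_ffmpeg_args(oh_voice, sabbath_voice, output):
--     voices = []
--     if oh_voice is not None:
--         voices += [('1500', oh_voice), ('5500', oh_voice)]
--     if sabbath_voice is not None:
--         voices.append(('3200', sabbath_voice))
--
--     filter_string = '[0:a]volume=1.0[a0]; '
--     for i, (delay, _) in enumerate(voices, 1):
--         filter_string += '[{0}:a]adelay={1}|{1},volume=5.0[a{0}]; '.format(i, delay)
--     filter_string += ''.join('[a{}]'.format(n) for n in range(len(voices) + 1))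
--     filter_string += 'amix=inputs={}:duration=longest[out]'.format(len(voices) + 1)
--
--     args = ['ffmpeg', '-i', 'baguette.mp4']
--     for _, voice in voices:
--         args += ['-i', voice]
--     args += ['-filter_complex', filter_string,
--              '-map', '0:v', '-map', '[out]',
--              '-preset', 'ultrafast', output]
--     return args
-- ===== Notes on version B (the rewrite author's own statement) =====
-- stated objective: simpler
-- what changed: B first collects the optional voices into a list of (delay, voice) pairs and then builds the args list and the filter string in single linear appends, instead of A's index-computed list.insert calls and stateful inputs counter.
import Mathlib
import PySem

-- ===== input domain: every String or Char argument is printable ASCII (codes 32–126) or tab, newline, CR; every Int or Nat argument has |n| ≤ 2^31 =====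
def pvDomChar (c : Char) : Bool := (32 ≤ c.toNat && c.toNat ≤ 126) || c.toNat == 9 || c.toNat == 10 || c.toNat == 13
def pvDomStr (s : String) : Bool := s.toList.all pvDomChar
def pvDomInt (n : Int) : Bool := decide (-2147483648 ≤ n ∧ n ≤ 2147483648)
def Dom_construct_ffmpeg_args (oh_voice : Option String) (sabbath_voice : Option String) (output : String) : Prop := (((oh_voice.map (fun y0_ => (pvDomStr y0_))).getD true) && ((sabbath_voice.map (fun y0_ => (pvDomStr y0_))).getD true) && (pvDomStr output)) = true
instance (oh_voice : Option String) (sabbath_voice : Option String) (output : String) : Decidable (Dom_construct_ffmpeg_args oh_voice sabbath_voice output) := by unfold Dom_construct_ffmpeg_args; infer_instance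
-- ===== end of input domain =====

-- B builds the args and filter by a single linear pass over a list of (delay, voice) inputs instead of index-based inserts; objective: simpler.

-- ===== PORT A =====
def construct_ffmpeg_args (oh_voice : Option String) (sabbath_voice : Option String) (output : String) : List String :=
  let filter_string := "[0:a]volume=1.0[a0]; "
  let args : List String := ["ffmpeg", "-i", "baguette.mp4", "-filter_complex",
      "-map", "0:v", "-map", "[out]", "-preset", "ultrafast", output]
  let inputs : Int := 1
  let (filter_string, args, inputs) :=
    match oh_voice with
    | none => (filter_string, args, inputs)
    | some v =>
      let filter_string := filter_string ++ "[" ++ PySem.Int.toStr inputs ++ ":a]adelay=1500|1500,volume=5.0[a" ++ PySem.Int.toStr inputs ++ "]; "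
      let inputs := inputs + 1
      let args := PySem.List.insert args (inputs * 2 - 1) v
      let args := PySem.List.insert args (inputs * 2 - 1) "-i"
      let filter_string := filter_string ++ "[" ++ PySem.Int.toStr inputs ++ ":a]adelay=5500|5500,volume=5.0[a" ++ PySem.Int.toStr inputs ++ "]; "
      let inputs := inputs + 1
      let args := PySem.List.insert args (inputs * 2 - 1) v
      let args := PySem.List.insert args (inputs * 2 - 1) "-i"
      (filter_string, args, inputs)
  let (filter_string, args, inputs) :=
    match sabbath_voice with
    | none => (filter_string, args, inputs)
    | some v =>
      let filter_string := filter_string ++ "[" ++ PySem.Int.toStr inputs ++ ":a]adelay=3200|3200,volume=5.0[a" ++ PySem.Int.toStr inputs ++ "]; "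
      let inputs := inputs + 1
      let args := PySem.List.insert args (inputs * 2 - 1) v
      let args := PySem.List.insert args (inputs * 2 - 1) "-i"
      (filter_string, args, inputs)
  let filter_string := (PySem.List.pyRange 0 inputs 1).foldl
      (fun fs n => fs ++ "[a" ++ PySem.Int.toStr n ++ "]") filter_string
  let filter_string := filter_string ++ "amix=inputs=" ++ PySem.Int.toStr inputs ++ ":duration=longest[out]"
  PySem.List.insert args (inputs * 2 + 2) filter_string

-- ===== PORT B =====
def construct_ffmpeg_args_alt (oh_voice : Option String) (sabbath_voice : Option String) (output : String) : List String :=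
  let voices : List (String × String) :=
    (match oh_voice with
     | none => []
     | some v => [("1500", v), ("5500", v)]) ++
    (match sabbath_voice with
     | none => []
     | some v => [("3200", v)])
  let filter_string := (PySem.List.enumerate voices 1).foldl
      (fun fs p => fs ++ "[" ++ PySem.Int.toStr p.1 ++ ":a]adelay=" ++ p.2.1 ++ "|" ++ p.2.1
          ++ ",volume=5.0[a" ++ PySem.Int.toStr p.1 ++ "]; ")
      "[0:a]volume=1.0[a0]; "
  let filter_string := filter_string ++
      PySem.Str.join "" ((PySem.List.pyRange 0 ((voices.length : Int) + 1) 1).map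
        (fun n => "[a" ++ PySem.Int.toStr n ++ "]"))
  let filter_string := filter_string ++ "amix=inputs=" ++ PySem.Int.toStr ((voices.length : Int) + 1) ++ ":duration=longest[out]"
  let args := voices.foldl (fun a p => a ++ ["-i", p.2]) ["ffmpeg", "-i", "baguette.mp4"]
  args ++ ["-filter_complex", filter_string, "-map", "0:v", "-map", "[out]",
      "-preset", "ultrafast", output]

-- ===== PRECONDITION & SPEC =====
def Spec_construct_ffmpeg_args (oh_voice : Option String) (sabbath_voice : Option String) (output : String) (out : List String) : Prop := out = construct_ffmpeg_args_alt oh_voice sabbath_voice output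
instance (oh_voice : Option String) (sabbath_voice : Option String) (output : String) (out : List String) : Decidable (Spec_construct_ffmpeg_args oh_voice sabbath_voice output out) := by unfold Spec_construct_ffmpeg_args; infer_instance

-- ===== CLAIM (what is proved, stated in full; the proofs are below) =====
def Claim_equal_construct_ffmpeg_args : Prop := ∀ (oh_voice : Option String) (sabbath_voice : Option String) (output : String), Dom_construct_ffmpeg_args oh_voice sabbath_voice output → Spec_construct_ffmpeg_args oh_voice sabbath_voice output (construct_ffmpeg_args oh_voice sabbath_voice output)

-- ===== LEMMAS AND PROOFS =====

-- ===== VERDICT (by name: the statement is the Claim_ definition above) =====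
theorem construct_ffmpeg_args_spec : Claim_equal_construct_ffmpeg_args := by
  intro oh_voice sabbath_voice output _
  unfold Spec_construct_ffmpeg_args
  cases oh_voice <;> cases sabbath_voice <;>
    simp [construct_ffmpeg_args, construct_ffmpeg_args_alt, PySem.List.insert_ofNat,
      PySem.List.pyRange, PySem.List.enumerate, PySem.Int.toStr, PySem.Str.join,
      List.range_succ] <;> decide
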